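-- pv_equiv track=rewrite | github.com/atlarge-research/ShareBench | notebooks/helpers/timeline.py | get_timeline
-- ===== SOURCE A (Python) =====
-- def get_timeline(changes, end_time=None):
--     total = 0
--     timeline = []
--
--     if len(changes) > 0:
--         first_time, first_delta = changes[0]
--         last_time = first_time - 1
--         for time, delta in changes:
--             if (time != last_time):
--                 timeline.append((last_time, total))
--                 timeline.append((time, total))
--                 last_time = time
--             total += delta
--         timeline.append((last_time, total))
--
--         if end_time != None:
--             if (end_time > last_time):
--                 timeline.append((end_time - 1, total))
--                 timeline.append((end_time, 0))
--
--     return timeline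
-- ===== SOURCE B (Python) =====
-- def get_timeline(changes, end_time=None):
--     if not changes:
--         return []
--     # pass 1: group consecutive equal times, keeping cumulative total after each group
--     groups = []
--     running = 0
--     for time, delta in changes:
--         running += delta
--         if groups and groups[-1][0] == time:
--             groups[-1] = (time, running)
--         else:
--             groups.append((time, running))
--     # pass 2: emit the paired step points from the group table
--     out = []
--     prev_total = 0
--     last_time = changes[0][0] - 1
--     for time, tot in groups:
--         out.append((last_time, prev_total))
--         out.append((time, prev_total))
--         prev_total = tot
--         last_time = time
--     out.append((last_time, prev_total))
--     if end_time is not None and end_time > last_time: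
--         out.append((end_time - 1, prev_total))
--         out.append((end_time, 0))
--     return out
-- ===== Notes on version B (the rewrite author's own statement) =====
-- stated objective: alternative
-- what changed: B splits A's single fused loop into two passes: a first pass builds a table of (distinct consecutive time, cumulative total after that group), and a second pass over that table emits the paired step points; A interleaves grouping, accumulation and emission in one loop.
import Mathlib
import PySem

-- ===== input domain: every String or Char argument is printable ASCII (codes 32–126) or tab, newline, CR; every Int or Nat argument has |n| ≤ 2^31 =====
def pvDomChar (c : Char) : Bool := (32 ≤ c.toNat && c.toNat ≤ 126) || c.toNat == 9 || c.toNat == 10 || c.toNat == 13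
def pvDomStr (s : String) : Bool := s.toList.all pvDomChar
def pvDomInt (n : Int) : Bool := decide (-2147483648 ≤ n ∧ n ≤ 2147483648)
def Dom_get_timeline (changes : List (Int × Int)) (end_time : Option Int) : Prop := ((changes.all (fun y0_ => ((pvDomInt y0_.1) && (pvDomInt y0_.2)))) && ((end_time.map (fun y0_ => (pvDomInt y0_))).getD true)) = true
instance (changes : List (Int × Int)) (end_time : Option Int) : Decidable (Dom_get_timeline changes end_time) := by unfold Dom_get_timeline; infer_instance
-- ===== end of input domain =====

-- B re-decomposes A's single fused loop into two passes (group consecutive equal times with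
-- cumulative totals, then emit the step points); same O(n) cost, no behaviour change intended.

-- ===== PORT A =====
-- A's loop body: state = (timeline, total, last_time)
def stepA (s : List (Int × Int) × Int × Int) (c : Int × Int) : List (Int × Int) × Int × Int :=
  if c.1 ≠ s.2.2 then (s.1 ++ [(s.2.2, s.2.1), (c.1, s.2.1)], s.2.1 + c.2, c.1)
  else (s.1, s.2.1 + c.2, s.2.2)

def get_timeline (changes : List (Int × Int)) (end_time : Option Int) : List (Int × Int) :=
  match changes with
  | [] => []          -- len(changes) > 0 is false: return the empty timeline
  | (first_time, _first_delta) :: _ =>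
    let st := changes.foldl stepA ([], 0, first_time - 1)
    let timeline := st.1 ++ [(st.2.2, st.2.1)]
    match end_time with
    | some e => if e > st.2.2 then timeline ++ [(e - 1, st.2.1), (e, 0)] else timeline
    | none => timeline

-- ===== PORT B =====
-- Source B pass 1 body: state = (groups, running); `groups[-1]` check via getLast?
def stepG (s : List (Int × Int) × Int) (c : Int × Int) : List (Int × Int) × Int :=
  let running := s.2 + c.2
  match s.1.getLast? with
  | some g => if g.1 == c.1 then (s.1.dropLast ++ [(c.1, running)], running)
              else (s.1 ++ [(c.1, running)], running)
  | none => (s.1 ++ [(c.1, running)], running)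

-- Source B pass 2 body: state = (out, prev_total, last_time)
def stepE (s : List (Int × Int) × Int × Int) (g : Int × Int) : List (Int × Int) × Int × Int :=
  (s.1 ++ [(s.2.2, s.2.1), (g.1, s.2.1)], g.2, g.1)

def get_timeline_alt (changes : List (Int × Int)) (end_time : Option Int) : List (Int × Int) :=
  match changes with
  | [] => []
  | (t0, _) :: _ =>
    let groups := (changes.foldl stepG ([], 0)).1
    let e := groups.foldl stepE ([], 0, t0 - 1)
    let out := e.1 ++ [(e.2.2, e.2.1)]
    match end_time with
    | some et => if et > e.2.2 then out ++ [(et - 1, e.2.1), (et, 0)] else out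
    | none => out

-- ===== PRECONDITION & SPEC =====
def Spec_get_timeline (changes : List (Int × Int)) (end_time : Option Int) (out : List (Int × Int)) : Prop := out = get_timeline_alt changes end_time
instance (changes : List (Int × Int)) (end_time : Option Int) (out : List (Int × Int)) : Decidable (Spec_get_timeline changes end_time out) := by unfold Spec_get_timeline; infer_instance

-- ===== CLAIM (what is proved, stated in full; the proofs are below) =====
def Claim_equal_get_timeline : Prop := ∀ (changes : List (Int × Int)) (end_time : Option Int), Dom_get_timeline changes end_time → Spec_get_timeline changes end_time (get_timeline changes end_time)

-- ===== LEMMAS AND PROOFS =====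

-- the group table that B's first pass computes, in recursive form
def grec (t run : Int) : List (Int × Int) → List (Int × Int)
  | [] => [(t, run)]
  | (t', d) :: rest => if t' = t then grec t (run + d) rest else (t, run) :: grec t' (run + d) rest

theorem foldG_grec (cs : List (Int × Int)) : ∀ (gs : List (Int × Int)) (t run : Int),
    (List.foldl stepG (gs ++ [(t, run)], run) cs).1 = gs ++ grec t run cs := by
  induction cs with
  | nil => intro gs t run; simp [grec]
  | cons c rest ih =>
    intro gs t run
    obtain ⟨t', d⟩ := c
    simp only [List.foldl_cons, stepG, grec, List.getLast?_concat, List.dropLast_concat]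
    by_cases h : t' = t
    · simp only [h, beq_self_eq_true, if_true]
      simpa using ih gs t (run + d)
    · have hbe : (t == t') = false := beq_eq_false_iff_ne.mpr (Ne.symm h)
      simp only [hbe, Bool.false_eq_true, if_false, if_neg h]
      have := ih (gs ++ [(t, run)]) t' (run + d)
      simpa [List.append_assoc] using this

theorem foldA_foldE (cs : List (Int × Int)) : ∀ (t run run0 last : Int) (tl : List (Int × Int)),
    List.foldl stepA (tl ++ [(last, run0), (t, run0)], run, t) cs
      = List.foldl stepE (tl, run0, last) (grec t run cs) := by
  induction cs with
  | nil => intro t run run0 last tl; simp [grec, stepE]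
  | cons c rest ih =>
    intro t run run0 last tl
    obtain ⟨t', d⟩ := c
    by_cases h : t' = t
    · simp only [grec, h, if_true, List.foldl_cons, stepA, ne_eq, not_true_eq_false]
      have := ih t (run + d) run0 last tl
      simpa using this
    · simp only [grec, if_neg h, List.foldl_cons, stepA, stepE]
      rw [if_pos (by simpa using h)]
      have := ih t' (run + d) run t (tl ++ [(last, run0), (t, run0)])
      simp only [List.append_assoc] at this ⊢
      simpa using this

-- ===== VERDICT (by name: the statement is the Claim_ definition above) =====
theorem get_timeline_spec : Claim_equal_get_timeline := by
  intro changes end_time _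
  unfold Spec_get_timeline
  match changes with
  | [] => rfl
  | (t0, d0) :: rest =>
    unfold get_timeline get_timeline_alt
    simp only
    have h1 : List.foldl stepA ([], 0, t0 - 1) ((t0, d0) :: rest)
        = List.foldl stepE ([], 0, t0 - 1) (grec t0 d0 rest) := by
      have hne : t0 ≠ t0 - 1 := by omega
      simp only [List.foldl_cons, stepA, if_pos (by simpa using hne)]
      have := foldA_foldE rest t0 d0 0 (t0 - 1) []
      simpa using this
    have h2 : (List.foldl stepG ([], 0) ((t0, d0) :: rest)).1 = grec t0 d0 rest := by
      simp only [List.foldl_cons, stepG, List.getLast?_nil]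
      have := foldG_grec rest [] t0 (0 + d0)
      simpa using this
    rw [h1, h2]
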